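-- pv_equiv track=rewrite | github.com/azirella-ltd/Autonomy-TMS | backend/app/services/geo_hierarchy_resolver.py | _build_mapping_from_data
-- ===== SOURCE A (Python) =====
-- from typing import Dict
--
-- def _find_region(geo_id: str, geo_data: dict) -> str:
--     """Walk parent chain and pick the best grouping level.
--
--     Strategy:
--       - chain length 1 (flat): use country, fall back to description
--       - chain length 2 (city → region): use the top (region)
--       - chain length 3+ (city → state → region → ...): use the second-from-top
--         (the "region" level, not the country root)
--     """
--     visited = set()
--     current = geo_id
--     chain = []
--     while current and current in geo_data and current not in visited:
--         visited.add(current)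
--         chain.append(current)
--         parent = geo_data[current].get("parent_geo_id")
--         if parent and parent in geo_data:
--             current = parent
--         else:
--             break
--
--     if not chain:
--         return "Other"
--
--     if len(chain) == 1:
--         # Flat — use country as grouping
--         d = geo_data.get(chain[0], {})
--         return d.get("country") or d.get("description") or "Other"
--
--     if len(chain) == 2:
--         # 2-level — top is the region
--         d = geo_data.get(chain[-1], {})
--         return d.get("description") or d.get("country") or "Other"
--
--     # 3+ levels — second-from-top is the region (top is country/root)
--     region_node = chain[-2]
--     d = geo_data.get(region_node, {})
--     return d.get("description") or d.get("country") or "Other"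
--
-- def _build_mapping_from_data(site_rows, geo_data: dict) -> Dict[str, str]:
--     """Build geo_id → region_name mapping from loaded data."""
--     mapping = {}
--     for row in site_rows:
--         site_geo_id = str(row[0])
--         geo_id = str(row[1]) if row[1] else site_geo_id
--         region = _find_region(geo_id, geo_data)
--         mapping[site_geo_id] = region
--         if row[1]:
--             mapping[str(row[1])] = region
--     return mapping
-- ===== SOURCE B (Python) =====
-- def _resolve_region(geo_id, geo_data):
--     """Resolve one geo_id to its region name via a recursive chain builder."""
--     if not geo_id or geo_id not in geo_data:
--         return "Other"
--
--     def chain_from(node, seen):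
--         seen = seen | {node}
--         parent = geo_data[node].get("parent_geo_id")
--         if parent and parent in geo_data and parent not in seen:
--             return [node] + chain_from(parent, seen)
--         return [node]
--
--     chain = chain_from(geo_id, frozenset())
--     if len(chain) == 1:
--         d = geo_data[chain[0]]
--         return d.get("country") or d.get("description") or "Other"
--     node = chain[-1] if len(chain) == 2 else chain[-2]
--     d = geo_data[node]
--     return d.get("description") or d.get("country") or "Other"
--
-- def _build_mapping_from_data(site_rows, geo_data):
--     """Staged: (1) the lookup key per row, (2) a region table over the
--     distinct keys, resolved once each, (3) assemble the mapping by lookup."""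
--     keys = [str(r[1]) if r[1] else str(r[0]) for r in site_rows]
--     regions = {k: _resolve_region(k, geo_data) for k in dict.fromkeys(keys)}
--     mapping = {}
--     for r, k in zip(site_rows, keys):
--         mapping[str(r[0])] = regions[k]
--         if r[1]:
--             mapping[str(r[1])] = regions[k]
--     return mapping
-- ===== Notes on version B (the rewrite author's own statement) =====
-- stated objective: alternative
-- what changed: B splits A's single loop into three staged passes - compute each row's lookup key, build a region table resolved once per distinct key by a recursive (cons-building) chain function instead of A's iterative append-accumulating while loop, then assemble the mapping by pure table lookups - so the parent chain is walked once per distinct geo_id rather than once per row.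
import Mathlib
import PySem

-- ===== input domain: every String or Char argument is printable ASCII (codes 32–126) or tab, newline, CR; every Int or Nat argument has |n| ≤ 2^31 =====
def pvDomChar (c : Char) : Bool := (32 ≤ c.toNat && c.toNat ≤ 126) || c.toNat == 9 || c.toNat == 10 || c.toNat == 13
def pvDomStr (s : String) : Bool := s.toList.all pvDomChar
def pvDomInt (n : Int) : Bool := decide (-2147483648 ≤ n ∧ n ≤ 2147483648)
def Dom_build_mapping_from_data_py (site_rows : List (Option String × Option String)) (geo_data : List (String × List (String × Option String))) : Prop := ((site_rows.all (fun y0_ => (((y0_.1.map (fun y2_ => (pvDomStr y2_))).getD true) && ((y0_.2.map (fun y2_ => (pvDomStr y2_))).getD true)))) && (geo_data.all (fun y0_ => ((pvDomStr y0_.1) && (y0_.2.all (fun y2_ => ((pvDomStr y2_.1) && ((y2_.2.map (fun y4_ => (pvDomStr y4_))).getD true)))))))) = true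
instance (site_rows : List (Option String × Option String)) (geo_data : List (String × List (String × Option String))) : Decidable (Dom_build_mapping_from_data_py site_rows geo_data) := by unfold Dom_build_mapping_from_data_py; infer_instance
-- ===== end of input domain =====

-- B restructures A: instead of A's per-row iterative chain rebuild inside one loop, B runs three
-- staged passes — per-row keys, a region table resolved once per DISTINCT key by a recursive
-- chain builder, then a lookup-only assembly pass (alternative structure; not measured faster).
-- Both return values only; nothing observable is mutated.

-- shared models of Python builtins on the given types
-- str(x) for x : Option String (str(None) = "None", str(s) = s)
def pvStr (o : Option String) : String := o.getD "None"
-- truthiness of an Optional[str]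
def pvTruthy (o : Option String) : Bool := match o with | some s => decide (s ≠ "") | none => false
-- d.get(k) on an inner dict whose values are Optional[str] (missing key ⇒ None)
def pvGetS (d : List (String × Option String)) (k : String) : Option String :=
  ((PySem.Dict.mk d).get? k).join
-- 'x or y' where x : Optional[str] ('' and None are falsy)
def pvOr (a : Option String) (b : String) : String :=
  match a with | some s => if s = "" then b else s | none => b

-- ===== PORT A =====
-- A's while loop: builds the visited set and the chain list; fuel = geo.length + 1 always
-- suffices (each iteration adds a distinct key of geo to visited).
def pvWalkA (geo : List (String × List (String × Option String))) :
    Nat → PySem.Set String → String → List String → List String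
  | 0, _, _, chain => chain
  | fuel+1, visited, current, chain =>
    if current ≠ "" ∧ ((PySem.Dict.mk geo).get? current).isSome ∧ current ∉ visited then
      let visited' := PySem.Set.add visited current
      let chain' := chain ++ [current]
      match pvGetS (((PySem.Dict.mk geo).get? current).getD []) "parent_geo_id" with
      | some p =>
          if p ≠ "" ∧ ((PySem.Dict.mk geo).get? p).isSome then pvWalkA geo fuel visited' p chain'
          else chain'
      | none => chain'
    else chain

def pvFindRegionA (geo_id : String) (geo : List (String × List (String × Option String))) : String :=
  let chain := pvWalkA geo (geo.length + 1) [] geo_id []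
  if chain = [] then "Other"
  else if chain.length = 1 then
    let d := ((PySem.Dict.mk geo).get? (chain.headD "")).getD []
    pvOr (pvGetS d "country") (pvOr (pvGetS d "description") "Other")
  else if chain.length = 2 then
    let d := ((PySem.Dict.mk geo).get? (chain.getLastD "")).getD []
    pvOr (pvGetS d "description") (pvOr (pvGetS d "country") "Other")
  else
    let d := ((PySem.Dict.mk geo).get? (chain.dropLast.getLastD "")).getD []
    pvOr (pvGetS d "description") (pvOr (pvGetS d "country") "Other")

def pvStepA (geo : List (String × List (String × Option String)))
    (m : PySem.Dict String String) (row : Option String × Option String) : PySem.Dict String String :=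
  let site := pvStr row.1
  let gid := if pvTruthy row.2 then pvStr row.2 else site
  let region := pvFindRegionA gid geo
  let m := m.insert site region
  if pvTruthy row.2 then m.insert (pvStr row.2) region else m

def build_mapping_from_data_py (site_rows : List (Option String × Option String)) (geo_data : List (String × List (String × Option String))) : List (String × String) :=
  (site_rows.foldl (pvStepA geo_data) PySem.Dict.empty).items

-- ===== PORT B =====
-- B's recursive chain_from: builds the chain front-to-back by cons; fuel = geo.length
-- suffices (each recursive call adds a distinct key of geo to seen, which starts non-empty).
def pvChainB (geo : List (String × List (String × Option String))) :
    Nat → PySem.Set String → String → List String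
  | 0, _, node => [node]
  | fuel+1, seen, node =>
    let seen' := PySem.Set.add seen node
    match pvGetS (((PySem.Dict.mk geo).get? node).getD []) "parent_geo_id" with
    | some p =>
        if p ≠ "" ∧ ((PySem.Dict.mk geo).get? p).isSome ∧ p ∉ seen' then
          node :: pvChainB geo fuel seen' p
        else [node]
    | none => [node]

def pvResolveB (geo_id : String) (geo : List (String × List (String × Option String))) : String :=
  if geo_id = "" ∨ ¬ ((PySem.Dict.mk geo).get? geo_id).isSome then "Other"
  else
    let chain := pvChainB geo geo.length [] geo_id
    if chain.length = 1 then
      let d := ((PySem.Dict.mk geo).get? (chain.headD "")).getD []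
      pvOr (pvGetS d "country") (pvOr (pvGetS d "description") "Other")
    else
      let node := if chain.length = 2 then chain.getLastD "" else chain.dropLast.getLastD ""
      let d := ((PySem.Dict.mk geo).get? node).getD []
      pvOr (pvGetS d "description") (pvOr (pvGetS d "country") "Other")

-- the per-row lookup key: str(r[1]) if r[1] else str(r[0])
def pvKeyB (row : Option String × Option String) : String :=
  if pvTruthy row.2 then pvStr row.2 else pvStr row.1

def build_mapping_from_data_py_alt (site_rows : List (Option String × Option String)) (geo_data : List (String × List (String × Option String))) : List (String × String) :=
  let keys := site_rows.map pvKeyB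
  -- {k: _resolve_region(k, geo_data) for k in dict.fromkeys(keys)}
  let regions := (PySem.List.dedup keys).foldl
    (fun d k => d.insert k (pvResolveB k geo_data)) PySem.Dict.empty
  -- stage 3: assemble the mapping in row order by table lookup (regions[k] always hits)
  let mapping := (site_rows.zip keys).foldl
    (fun m rk =>
      let region := (regions.get? rk.2).getD "Other"
      let m := m.insert (pvStr rk.1.1) region
      if pvTruthy rk.1.2 then m.insert (pvStr rk.1.2) region else m)
    PySem.Dict.empty
  mapping.items

-- ===== PRECONDITION & SPEC =====
def Spec_build_mapping_from_data_py (site_rows : List (Option String × Option String)) (geo_data : List (String × List (String × Option String))) (out : List (String × String)) : Prop := out = build_mapping_from_data_py_alt site_rows geo_data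
instance (site_rows : List (Option String × Option String)) (geo_data : List (String × List (String × Option String))) (out : List (String × String)) : Decidable (Spec_build_mapping_from_data_py site_rows geo_data out) := by unfold Spec_build_mapping_from_data_py; infer_instance

-- ===== CLAIM (what is proved, stated in full; the proofs are below) =====
def Claim_equal_build_mapping_from_data_py : Prop := ∀ (site_rows : List (Option String × Option String)) (geo_data : List (String × List (String × Option String))), Dom_build_mapping_from_data_py site_rows geo_data → Spec_build_mapping_from_data_py site_rows geo_data (build_mapping_from_data_py site_rows geo_data)

-- ===== LEMMAS AND PROOFS =====

-- A's accumulator loop equals the accumulator plus B's recursive chain.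
theorem pvWalk_eq_chain (geo : List (String × List (String × Option String))) :
    ∀ (f : Nat) (visited : PySem.Set String) (cur : String) (acc : List String),
      cur ≠ "" → ((PySem.Dict.mk geo).get? cur).isSome → cur ∉ visited →
      pvWalkA geo (f+1) visited cur acc = acc ++ pvChainB geo f visited cur := by
  intro f
  induction f with
  | zero =>
    intro visited cur acc h1 h2 h3
    simp only [pvWalkA, pvChainB]
    rw [if_pos ⟨h1, h2, h3⟩]
    cases pvGetS (((PySem.Dict.mk geo).get? cur).getD []) "parent_geo_id" with
    | none => rfl
    | some p => simp
  | succ f ih =>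
    intro visited cur acc h1 h2 h3
    have hAu : pvWalkA geo (f+1+1) visited cur acc
        = (match pvGetS (((PySem.Dict.mk geo).get? cur).getD []) "parent_geo_id" with
           | some p =>
               if p ≠ "" ∧ ((PySem.Dict.mk geo).get? p).isSome then
                 pvWalkA geo (f+1) (PySem.Set.add visited cur) p (acc ++ [cur])
               else acc ++ [cur]
           | none => acc ++ [cur]) := by
      simp only [pvWalkA]
      rw [if_pos ⟨h1, h2, h3⟩]
    have hBu : pvChainB geo (f+1) visited cur
        = (match pvGetS (((PySem.Dict.mk geo).get? cur).getD []) "parent_geo_id" with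
           | some p =>
               if p ≠ "" ∧ ((PySem.Dict.mk geo).get? p).isSome ∧ p ∉ PySem.Set.add visited cur then
                 cur :: pvChainB geo f (PySem.Set.add visited cur) p
               else [cur]
           | none => [cur]) := by
      simp only [pvChainB]
    rw [hAu, hBu]
    cases hp : pvGetS (((PySem.Dict.mk geo).get? cur).getD []) "parent_geo_id" with
    | none => rfl
    | some p =>
      dsimp only
      by_cases hc : p ≠ "" ∧ ((PySem.Dict.mk geo).get? p).isSome
      · by_cases hpv : p ∈ PySem.Set.add visited cur
        · have hAin : pvWalkA geo (f+1) (PySem.Set.add visited cur) p (acc ++ [cur])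
              = acc ++ [cur] := by
            simp only [pvWalkA]
            rw [if_neg (by simp [hpv])]
          rw [if_pos hc, hAin, if_neg (by simp [hpv])]
        · rw [if_pos hc, if_pos ⟨hc.1, hc.2, hpv⟩,
            ih (PySem.Set.add visited cur) p (acc ++ [cur]) hc.1 hc.2 hpv]
          simp
      · rw [if_neg hc, if_neg (by tauto)]

-- B's chain is never empty.
theorem pvChainB_ne_nil (geo : List (String × List (String × Option String)))
    (f : Nat) (seen : PySem.Set String) (node : String) :
    pvChainB geo f seen node ≠ [] := by
  cases f with
  | zero => simp [pvChainB]
  | succ f =>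
    simp only [pvChainB]
    cases pvGetS (((PySem.Dict.mk geo).get? node).getD []) "parent_geo_id" with
    | none => simp
    | some p =>
      dsimp only
      split_ifs with h <;> simp

-- The two region computations agree.
theorem pvFindRegion_eq (gid : String) (geo : List (String × List (String × Option String))) :
    pvFindRegionA gid geo = pvResolveB gid geo := by
  by_cases h0 : gid = "" ∨ ¬ ((PySem.Dict.mk geo).get? gid).isSome
  · have hA : pvWalkA geo (geo.length + 1) [] gid [] = [] := by
      simp only [pvWalkA]
      rw [if_neg (by rintro ⟨hg, hs, -⟩; rcases h0 with h | h; exacts [hg h, h hs])]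
    simp only [pvFindRegionA, pvResolveB, hA]
    rw [if_pos h0]
    simp
  · push Not at h0
    obtain ⟨h1, h2⟩ := h0
    have hchain := pvWalk_eq_chain geo geo.length [] gid [] h1 h2 (List.not_mem_nil)
    have hguard : ¬ (gid = "" ∨ ¬ ((PySem.Dict.mk geo).get? gid).isSome = true) := by
      push Not; exact ⟨h1, by simp [h2]⟩
    simp only [pvFindRegionA, pvResolveB, hchain, List.nil_append]
    rw [if_neg (pvChainB_ne_nil geo geo.length [] gid), if_neg hguard]
    by_cases e1 : (pvChainB geo geo.length [] gid).length = 1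
    · rw [if_pos e1, if_pos e1]
    · rw [if_neg e1, if_neg e1]
      by_cases e2 : (pvChainB geo geo.length [] gid).length = 2
      · simp only [if_pos e2]
      · simp only [if_neg e2]

-- The region table built over any key list answers pvResolveB on its members.
theorem pvRegions_get (geo : List (String × List (String × Option String))) :
    ∀ (l : List String) (d : PySem.Dict String String) (k : String),
      (k ∈ l ∨ d.get? k = some (pvResolveB k geo)) →
      (l.foldl (fun d k => d.insert k (pvResolveB k geo)) d).get? k
        = some (pvResolveB k geo) := by
  intro l
  induction l with
  | nil => intro d k h; simpa using h
  | cons x rest ih =>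
    intro d k h
    simp only [List.foldl_cons]
    apply ih
    by_cases hk : k ∈ rest
    · exact Or.inl hk
    · right
      rw [PySem.Dict.get?_insert]
      by_cases hx : k = x
      · rw [if_pos hx, hx]
      · rw [if_neg hx]
        rcases h with h | h
        · simp [hx, hk] at h
        · exact h

-- Folding over l zipped with its own map is folding over l.
theorem pvFoldl_zip_map {α β γ : Type} (f : α → β) (g : γ → α × β → γ) :
    ∀ (l : List α) (init : γ),
      (l.zip (l.map f)).foldl g init = l.foldl (fun a r => g a (r, f r)) init := by
  intro l
  induction l with
  | nil => intro init; rfl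
  | cons x rest ih => intro init; simp only [List.map_cons, List.zip_cons_cons,
      List.foldl_cons, ih]

-- ===== VERDICT (by name: the statement is the Claim_ definition above) =====
theorem build_mapping_from_data_py_spec : Claim_equal_build_mapping_from_data_py := by
  intro site_rows geo_data _
  unfold Spec_build_mapping_from_data_py build_mapping_from_data_py build_mapping_from_data_py_alt
  dsimp only
  rw [pvFoldl_zip_map]
  congr 1
  apply PySem.List.foldl_congr_mem
  intro m row hrow
  have hget : ((PySem.List.dedup (site_rows.map pvKeyB)).foldl
      (fun d k => d.insert k (pvResolveB k geo_data)) PySem.Dict.empty).get? (pvKeyB row)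
      = some (pvResolveB (pvKeyB row) geo_data) := by
    apply pvRegions_get
    left
    rw [PySem.List.mem_dedup]
    exact List.mem_map_of_mem hrow
  by_cases ht : pvTruthy row.2 = true <;>
    simp only [pvStepA, pvFindRegion_eq, pvKeyB, ht, if_true, Bool.false_eq_true, if_false]
      at hget ⊢ <;>
    simp only [hget, Option.getD_some]
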